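-- pv_equiv track=rewrite | github.com/harneet2512/groundtruth | benchmarks/swebench/gt_hook.py | _greedy_optimal_assignment
-- ===== SOURCE A (Python) =====
-- def _edit_distance(a: str, b: str) -> int:
--     """Standard Levenshtein distance."""
--     m, n = len(a), len(b)
--     prev = list(range(n + 1))
--     for i in range(1, m + 1):
--         curr = [i] + [0] * n
--         for j in range(1, n + 1):
--             cost = 0 if a[i - 1] == b[j - 1] else 1
--             curr[j] = min(prev[j] + 1, curr[j - 1] + 1, prev[j - 1] + cost)
--         prev = curr
--     return prev[n]
--
-- def _greedy_optimal_assignment(args: list[str], params: list[str]) -> list[int]: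
--     """Greedy min-cost bipartite matching: returns param index for each arg position."""
--     k = min(len(args), len(params))
--     used_params: set[int] = set()
--     assignment: list[int] = [-1] * k
--
--     costs = [
--         [_edit_distance(args[i], params[j]) for j in range(len(params))]
--         for i in range(k)
--     ]
--
--     for _ in range(k):
--         best_cost = 10 ** 9
--         best_i = best_j = -1
--         for i in range(k):
--             if assignment[i] != -1:
--                 continue
--             for j in range(len(params)):
--                 if j in used_params:
--                     continue
--                 if costs[i][j] < best_cost:
--                     best_cost = costs[i][j]
--                     best_i, best_j = i, j
--         if best_i == -1:
--             break
--         assignment[best_i] = best_j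
--         used_params.add(best_j)
--
--     return assignment
-- ===== SOURCE B (Python) =====
-- def _edit_distance(a: str, b: str) -> int:
--     """Standard Levenshtein distance."""
--     m, n = len(a), len(b)
--     prev = list(range(n + 1))
--     for i in range(1, m + 1):
--         curr = [i] + [0] * n
--         for j in range(1, n + 1):
--             cost = 0 if a[i - 1] == b[j - 1] else 1
--             curr[j] = min(prev[j] + 1, curr[j - 1] + 1, prev[j - 1] + cost)
--         prev = curr
--     return prev[n]
--
-- def _greedy_optimal_assignment(args: list[str], params: list[str]) -> list[int]:
--     """Sort all (cost, i, j) edges once; sweep them, assigning each first-free pair.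
--
--     Only edges of cost below the 10**9 'infinity' threshold are candidates
--     (the selection threshold the greedy matching starts from).
--     """
--     k = min(len(args), len(params))
--     edges = []
--     for i in range(k):
--         for j in range(len(params)):
--             c = _edit_distance(args[i], params[j])
--             if c < 10 ** 9:
--                 edges.append((c, i, j))
--     edges.sort()
--     assignment = [-1] * k
--     used = [False] * len(params)
--     for _cost, i, j in edges:
--         if assignment[i] == -1 and not used[j]:
--             assignment[i] = j
--             used[j] = True
--     return assignment
-- ===== Notes on version B (the rewrite author's own statement) =====
-- stated objective: alternative
-- what changed: A repeats a full scan of the whole cost matrix for each of the k assignments; B collects all (cost,i,j) edges below the 10**9 selection threshold once, sorts them lexicographically, and makes one greedy sweep assigning each edge whose arg slot and param are still free.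
import Mathlib
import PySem

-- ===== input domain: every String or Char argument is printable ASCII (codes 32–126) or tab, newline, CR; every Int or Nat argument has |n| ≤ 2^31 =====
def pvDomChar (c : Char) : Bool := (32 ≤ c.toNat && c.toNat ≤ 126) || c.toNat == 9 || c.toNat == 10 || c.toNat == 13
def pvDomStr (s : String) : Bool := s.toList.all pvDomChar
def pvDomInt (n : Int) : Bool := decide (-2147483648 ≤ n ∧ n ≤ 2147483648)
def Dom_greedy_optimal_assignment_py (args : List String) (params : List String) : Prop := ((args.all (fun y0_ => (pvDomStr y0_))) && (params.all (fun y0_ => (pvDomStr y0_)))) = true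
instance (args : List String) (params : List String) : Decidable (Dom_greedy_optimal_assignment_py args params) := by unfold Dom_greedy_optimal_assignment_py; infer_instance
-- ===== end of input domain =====

-- B replaces A's repeated full scans of the cost matrix (one per assignment) by a single
-- lexicographic sort of the candidate (cost, i, j) edges (those below A's 10**9 selection
-- threshold) followed by one greedy sweep — same result by a structurally different algorithm.

-- ===== PORT A =====

-- _edit_distance: literal port; strings are indexed via toList.getD (indices are always in range here)
def pvED (a : String) (b : String) : Int :=
  let la := a.toList
  let lb := b.toList
  let m := la.length
  let n := lb.length
  let prev : List Int := (List.range (n + 1)).map (fun (x : Nat) => (x : Int))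
  let prev := (List.range m).foldl (fun prev i0 =>
    let i := i0 + 1
    let curr : List Int := ((i : Nat) : Int) :: List.replicate n 0
    (List.range n).foldl (fun curr j0 =>
      let j := j0 + 1
      let cost : Int := if la.getD (i - 1) ' ' = lb.getD (j - 1) ' ' then 0 else 1
      curr.set j (min (min (prev.getD j 0 + 1) (curr.getD (j - 1) 0 + 1)) (prev.getD (j - 1) 0 + cost)))
      curr) prev
  prev.getD n 0

-- the cost matrix built before the greedy loop
def pvCosts (args : List String) (params : List String) : List (List Int) :=
  (List.range (min args.length params.length)).map (fun i =>
    (List.range params.length).map (fun j => pvED (args.getD i "") (params.getD j "")))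

-- one iteration of A's `for _ in range(k)` loop; state = (assignment, used_params, broke)
def pvRound (args : List String) (params : List String)
    (st : List Int × PySem.Set Int × Bool) : List Int × PySem.Set Int × Bool :=
  if st.2.2 then st else
  let costs := pvCosts args params
  let sel : Int × Int × Int :=
    (List.range (min args.length params.length)).foldl (fun b i =>
      if st.1.getD i (-1) ≠ -1 then b
      else (List.range params.length).foldl (fun b j =>
        if PySem.Set.contains st.2.1 ((j : Nat) : Int) then b
        else if (costs.getD i []).getD j 0 < b.1 then ((costs.getD i []).getD j 0, (i : Int), (j : Int))
        else b) b)
      ((10 : Int) ^ 9, -1, -1)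
  if sel.2.1 = -1 then (st.1, st.2.1, true)
  else (st.1.set sel.2.1.toNat sel.2.2, PySem.Set.add st.2.1 sel.2.2, st.2.2)

def greedy_optimal_assignment_py (args : List String) (params : List String) : List Int :=
  let k := min args.length params.length
  ((List.range k).foldl (fun st _ => pvRound args params st)
    (List.replicate k (-1), PySem.Set.empty, false)).1

-- ===== PORT B =====

-- Python's `<=` on the int tuples (cost, i, j): lexicographic
def pvLexLe (e : Int × Nat × Nat) (f : Int × Nat × Nat) : Bool :=
  decide (e.1 < f.1) || (decide (e.1 = f.1) &&
    (decide (e.2.1 < f.2.1) || (decide (e.2.1 = f.2.1) && decide (e.2.2 ≤ f.2.2))))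

-- body of B's sweep: take the edge if its arg slot and param are both still free
def pvStepB (s : List Int × List Bool) (e : Int × Nat × Nat) : List Int × List Bool :=
  if s.1.getD e.2.1 (-1) = -1 ∧ s.2.getD e.2.2 true = false
  then (s.1.set e.2.1 ((e.2.2 : Nat) : Int), s.2.set e.2.2 true)
  else s

def greedy_optimal_assignment_py_alt (args : List String) (params : List String) : List Int :=
  let k := min args.length params.length
  let edges : List (Int × Nat × Nat) :=
    (List.range k).flatMap (fun i =>
      ((List.range params.length).map (fun j =>
        (pvED (args.getD i "") (params.getD j ""), i, j))).filter
        (fun e => decide (e.1 < (10 : Int) ^ 9)))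
  -- edges.sort(): Python sorts the int tuples lexicographically; mergeSort with pvLexLe is exact (stable, total order)
  ((edges.mergeSort pvLexLe).foldl pvStepB
    (List.replicate k (-1), List.replicate params.length false)).1

-- ===== PRECONDITION & SPEC =====

def Spec_greedy_optimal_assignment_py (args : List String) (params : List String) (out : List Int) : Prop := out = greedy_optimal_assignment_py_alt args params
instance (args : List String) (params : List String) (out : List Int) : Decidable (Spec_greedy_optimal_assignment_py args params out) := by unfold Spec_greedy_optimal_assignment_py; infer_instance

-- ===== CLAIM (what is proved, stated in full; the proofs are below) =====
def Claim_equal_greedy_optimal_assignment_py : Prop := ∀ (args : List String) (params : List String), Dom_greedy_optimal_assignment_py args params → Spec_greedy_optimal_assignment_py args params (greedy_optimal_assignment_py args params)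

-- ===== LEMMAS AND PROOFS =====

-- ---- generic list facts ----

lemma pv_foldl_iterate {α β : Type} (l : List α) (g : β → β) (s : β) :
    l.foldl (fun s _ => g s) s = g^[l.length] s := by
  induction l generalizing s with
  | nil => rfl
  | cons x t ih => simp [List.foldl_cons, ih, Function.iterate_succ_apply]

lemma pv_foldl_id {α β : Type} (l : List α) (f : β → α → β) (b : β)
    (h : ∀ b x, x ∈ l → f b x = b) : l.foldl f b = b := by
  induction l generalizing b with
  | nil => rfl
  | cons x t ih =>
    rw [List.foldl_cons, h b x (by simp)]
    exact ih b (fun b x hx => h b x (by simp [hx]))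

lemma pvGetD_set {α : Type} (l : List α) (i : Nat) (v : α) (m : Nat) (d : α) :
    (l.set i v).getD m d = if m = i ∧ i < l.length then v else l.getD m d := by
  simp only [List.getD_eq_getElem?_getD, List.getElem?_set]
  split_ifs with h1 h2 h3 <;> simp_all

lemma pvCount_set (l : List Int) (i : Nat) (v : Int) (hi : i < l.length)
    (h : l.getD i (-1) = -1) (hv : v ≠ -1) :
    (l.set i v).count (-1) + 1 = l.count (-1) := by
  induction l generalizing i with
  | nil => simp at hi
  | cons x t ih =>
    cases i with
    | zero =>
      simp only [List.getD_cons_zero] at h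
      subst h
      simp [hv]
    | succ i =>
      simp only [List.set_cons_succ, List.count_cons]
      have := ih i (by simpa using hi) (by simpa using h)
      omega

-- ---- orders on edges ----

def pvIJlt (e f : Int × Nat × Nat) : Prop :=
  e.2.1 < f.2.1 ∨ (e.2.1 = f.2.1 ∧ e.2.2 < f.2.2)

lemma pvLexLe_trans (a b c : Int × Nat × Nat) (h1 : pvLexLe a b = true) (h2 : pvLexLe b c = true) :
    pvLexLe a c = true := by
  simp only [pvLexLe, Bool.or_eq_true, Bool.and_eq_true, decide_eq_true_eq] at *
  omega

lemma pvLexLe_total (a b : Int × Nat × Nat) : (pvLexLe a b || pvLexLe b a) = true := by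
  simp only [pvLexLe, Bool.or_eq_true, Bool.and_eq_true, decide_eq_true_eq]
  omega

lemma pvLexLe_antisymm (a b : Int × Nat × Nat) (h1 : pvLexLe a b = true) (h2 : pvLexLe b a = true) :
    a = b := by
  simp only [pvLexLe, Bool.or_eq_true, Bool.and_eq_true, decide_eq_true_eq] at *
  have ha : a = (a.1, a.2.1, a.2.2) := rfl
  have hb : b = (b.1, b.2.1, b.2.2) := rfl
  rw [ha, hb]
  have h : a.1 = b.1 ∧ a.2.1 = b.2.1 ∧ a.2.2 = b.2.2 := by omega
  rw [h.1, h.2.1, h.2.2]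

-- ---- the edge lists and their properties ----

def pvCost (args : List String) (params : List String) (i j : Nat) : Int :=
  pvED (args.getD i "") (params.getD j "")

-- all edges (the implicit search space of A's nested scans)
def pvE0 (args : List String) (params : List String) : List (Int × Nat × Nat) :=
  (List.range (min args.length params.length)).flatMap (fun i =>
    (List.range params.length).map (fun j => (pvCost args params i j, i, j)))

-- the candidate edges B collects: those below the 10^9 threshold
def pvE0F (args : List String) (params : List String) : List (Int × Nat × Nat) :=
  (pvE0 args params).filter (fun e => decide (e.1 < (10 : Int) ^ 9))

def pvLsort (args : List String) (params : List String) : List (Int × Nat × Nat) :=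
  (pvE0F args params).mergeSort pvLexLe

lemma pvE0_mem (args params : List String) (e : Int × Nat × Nat) (he : e ∈ pvE0 args params) :
    e.2.1 < min args.length params.length ∧ e.2.2 < params.length ∧ e.1 = pvCost args params e.2.1 e.2.2 := by
  simp only [pvE0, List.mem_flatMap, List.mem_map, List.mem_range] at he
  obtain ⟨i, hi, j, hj, rfl⟩ := he
  exact ⟨hi, hj, rfl⟩

lemma pvE0F_mem (args params : List String) (e : Int × Nat × Nat) (he : e ∈ pvE0F args params) :
    e ∈ pvE0 args params ∧ e.1 < 10 ^ 9 := by
  rw [pvE0F, List.mem_filter] at he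
  exact ⟨he.1, by simpa using he.2⟩

lemma pvE0_pairwise (args params : List String) : (pvE0 args params).Pairwise pvIJlt := by
  unfold pvE0
  generalize min args.length params.length = k
  induction k with
  | zero => simp
  | succ k ih =>
    rw [List.range_succ, List.flatMap_append, List.pairwise_append]
    refine ⟨ih, ?_, ?_⟩
    · simp only [List.flatMap_cons, List.flatMap_nil, List.append_nil, List.pairwise_map]
      refine List.Pairwise.imp ?_ List.pairwise_lt_range
      intro a b hab
      exact Or.inr ⟨rfl, hab⟩
    · intro a ha b hb
      simp only [List.mem_flatMap, List.mem_map, List.mem_range, List.flatMap_cons,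
        List.flatMap_nil, List.append_nil] at ha hb
      obtain ⟨i, hi, j, hj, rfl⟩ := ha
      obtain ⟨j2, hj2, rfl⟩ := hb
      exact Or.inl hi

lemma pvE0F_pairwise (args params : List String) : (pvE0F args params).Pairwise pvIJlt :=
  (pvE0_pairwise args params).filter _

-- B's edge list (filter inside the flatMap) is the filtered full edge list
lemma pvE0F_eq_alt_edges (args params : List String) :
    (List.range (min args.length params.length)).flatMap (fun i =>
      ((List.range params.length).map (fun j =>
        (pvED (args.getD i "") (params.getD j ""), i, j))).filter
        (fun e => decide (e.1 < (10 : Int) ^ 9))) = pvE0F args params := by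
  rw [pvE0F, pvE0, List.filter_flatMap]
  rfl

lemma pvLsort_perm (args params : List String) : (pvLsort args params).Perm (pvE0F args params) :=
  List.mergeSort_perm _ _

lemma pvLsort_pairwise (args params : List String) :
    (pvLsort args params).Pairwise (fun a b => pvLexLe a b = true) :=
  List.pairwise_mergeSort pvLexLe_trans pvLexLe_total _

-- ---- the selection scan ----

def pvSel (ok : (Int × Nat × Nat) → Bool) (b : Int × Int × Int) (e : Int × Nat × Nat) : Int × Int × Int :=
  if ok e = true ∧ e.1 < b.1 then (e.1, (e.2.1 : Int), (e.2.2 : Int)) else b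

-- with a running best ≤ 10^9, edges of cost ≥ 10^9 are never taken: the scan equals the scan of the filtered list
lemma pvScan_filter (ok : (Int × Nat × Nat) → Bool) :
    ∀ (M : List (Int × Nat × Nat)) (b : Int × Int × Int), b.1 ≤ 10 ^ 9 →
    M.foldl (pvSel ok) b = (M.filter (fun e => decide (e.1 < (10 : Int) ^ 9))).foldl (pvSel ok) b := by
  intro M
  induction M with
  | nil => intro b _; rfl
  | cons e M2 ih =>
    intro b hb
    by_cases he : e.1 < 10 ^ 9
    · rw [List.foldl_cons, List.filter_cons_of_pos (by simpa using he), List.foldl_cons]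
      apply ih
      simp only [pvSel]
      split_ifs with h
      · exact le_of_lt he
      · exact hb
    · rw [List.foldl_cons, List.filter_cons_of_neg (by simpa using he),
        show pvSel ok b e = b from by simp only [pvSel]; rw [if_neg]; rintro ⟨-, h⟩; omega]
      exact ih b hb

-- characterization of the strict-min scan over a list whose (i, j) pairs strictly increase
lemma pvScanSpec (ok : (Int × Nat × Nat) → Bool) :
    ∀ (M : List (Int × Nat × Nat)) (b : Int × Int × Int), M.Pairwise pvIJlt →
    (M.foldl (pvSel ok) b = b ∧ ∀ g ∈ M, ok g = true → ¬ g.1 < b.1) ∨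
    (∃ f, f ∈ M ∧ ok f = true ∧ f.1 < b.1 ∧
      M.foldl (pvSel ok) b = (f.1, (f.2.1 : Int), (f.2.2 : Int)) ∧
      ∀ g ∈ M, ok g = true → g.1 < b.1 → pvLexLe f g = true) := by
  intro M
  induction M with
  | nil => intro b _; left; simp
  | cons e M2 ih =>
    intro b hp
    have hpM2 : M2.Pairwise pvIJlt := (List.pairwise_cons.mp hp).2
    have hpe : ∀ g ∈ M2, pvIJlt e g := (List.pairwise_cons.mp hp).1
    by_cases he : ok e = true ∧ e.1 < b.1
    · rw [List.foldl_cons, show pvSel ok b e = (e.1, (e.2.1 : Int), (e.2.2 : Int)) by simp [pvSel, he]]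
      rcases ih (e.1, (e.2.1 : Int), (e.2.2 : Int)) hpM2 with ⟨heq, hno⟩ | ⟨f, hf, hokf, hflt, heq, hmin⟩
      · right
        refine ⟨e, by simp, he.1, he.2, heq, ?_⟩
        intro g hg hokg hglt
        rcases List.mem_cons.mp hg with rfl | hg
        · simp [pvLexLe]
        · have hge : ¬ g.1 < e.1 := hno g hg hokg
          have hij := hpe g hg
          simp only [pvLexLe, Bool.or_eq_true, Bool.and_eq_true, decide_eq_true_eq]
          rcases hij with h | ⟨h1, h2⟩ <;> omega
      · right
        refine ⟨f, by simp [hf], hokf, lt_trans hflt he.2, heq, ?_⟩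
        intro g hg hokg hglt
        rcases List.mem_cons.mp hg with rfl | hg
        · simp only [pvLexLe, Bool.or_eq_true, decide_eq_true_eq]
          exact Or.inl hflt
        · by_cases hge : g.1 < e.1
          · exact hmin g hg hokg hge
          · simp only [pvLexLe, Bool.or_eq_true, decide_eq_true_eq]
            exact Or.inl (by omega)
    · rw [List.foldl_cons, show pvSel ok b e = b by simp only [pvSel, if_neg he]]
      rcases ih b hpM2 with ⟨heq, hno⟩ | ⟨f, hf, hokf, hflt, heq, hmin⟩
      · left
        refine ⟨heq, ?_⟩
        intro g hg hokg
        rcases List.mem_cons.mp hg with rfl | hg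
        · intro hlt; exact he ⟨hokg, hlt⟩
        · exact hno g hg hokg
      · right
        refine ⟨f, by simp [hf], hokf, hflt, heq, ?_⟩
        intro g hg hokg hglt
        rcases List.mem_cons.mp hg with rfl | hg
        · exact absurd ⟨hokg, hglt⟩ he
        · exact hmin g hg hokg hglt

-- with no valid edge the scan keeps its initial value
lemma pvScan_none (ok : (Int × Nat × Nat) → Bool) (M : List (Int × Nat × Nat)) (b : Int × Int × Int)
    (h : ∀ g ∈ M, ok g = false) : M.foldl (pvSel ok) b = b := by
  apply pv_foldl_id
  intro b g hg
  simp [pvSel, h g hg]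

-- the scan over all edges returns the first free edge of the sorted candidate list
lemma pvSelMain (args params : List String) (ok : (Int × Nat × Nat) → Bool)
    (L1 : List (Int × Nat × Nat)) (e : Int × Nat × Nat) (L2 : List (Int × Nat × Nat))
    (hsplit : L1 ++ e :: L2 = pvLsort args params)
    (hL1 : ∀ f ∈ L1, ok f = false) (he : ok e = true) :
    (pvE0 args params).foldl (pvSel ok) ((10 : Int) ^ 9, -1, -1) = (e.1, (e.2.1 : Int), (e.2.2 : Int)) := by
  have hmemLs : e ∈ pvLsort args params := by rw [← hsplit]; simp
  have heF : e ∈ pvE0F args params := (pvLsort_perm args params).mem_iff.mp hmemLs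
  have hemin : ∀ g ∈ pvLsort args params, ok g = true → pvLexLe e g = true := by
    intro g hg hokg
    rw [← hsplit] at hg
    have hpw := pvLsort_pairwise args params
    rw [← hsplit, List.pairwise_append, List.pairwise_cons] at hpw
    rcases List.mem_append.mp hg with hg | hg
    · rw [hL1 g hg] at hokg; exact absurd hokg (by simp)
    · rcases List.mem_cons.mp hg with rfl | hg
      · simp [pvLexLe]
      · exact hpw.2.1.1 g hg
  rw [pvScan_filter ok (pvE0 args params) _ (by norm_num),
    show (pvE0 args params).filter (fun e => decide (e.1 < (10 : Int) ^ 9)) = pvE0F args params from rfl]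
  rcases pvScanSpec ok (pvE0F args params) ((10 : Int) ^ 9, -1, -1) (pvE0F_pairwise args params)
    with ⟨heq, hno⟩ | ⟨f, hf, hokf, hflt, heq, hmin⟩
  · exact absurd (pvE0F_mem args params e heF).2 (hno e heF he)
  · have h1 : pvLexLe f e = true := hmin e heF he (pvE0F_mem args params e heF).2
    have h2 : pvLexLe e f = true :=
      hemin f ((pvLsort_perm args params).symm.mem_iff.mp hf) hokf
    rw [heq, pvLexLe_antisymm f e h1 h2]

-- ---- bridging port A's nested scan to the edge-list scan ----

def pvOKb (A : List Int) (U : List Bool) (e : Int × Nat × Nat) : Bool :=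
  decide (A.getD e.2.1 (-1) = -1 ∧ U.getD e.2.2 true = false)

lemma pvCosts_get (args params : List String) (i j : Nat)
    (hi : i < min args.length params.length) (hj : j < params.length) :
    (((pvCosts args params).getD i []).getD j 0) = pvCost args params i j := by
  unfold pvCosts pvCost
  rw [List.getD_eq_getElem _ [] (by simpa using hi), List.getElem_map, List.getElem_range,
    List.getD_eq_getElem _ 0 (by simpa using hj), List.getElem_map, List.getElem_range]

-- port A's nested selection loops equal one scan over pvE0
lemma pvRound_scan (args params : List String) (A : List Int) (u : PySem.Set Int) :
    (List.range (min args.length params.length)).foldl (fun b i =>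
      if A.getD i (-1) ≠ -1 then b
      else (List.range params.length).foldl (fun b j =>
        if PySem.Set.contains u ((j : Nat) : Int) then b
        else if ((pvCosts args params).getD i []).getD j 0 < b.1 then
          (((pvCosts args params).getD i []).getD j 0, (i : Int), (j : Int))
        else b) b)
      ((10 : Int) ^ 9, -1, -1)
    = (pvE0 args params).foldl
        (pvSel (fun e => decide (A.getD e.2.1 (-1) = -1) && !(PySem.Set.contains u ((e.2.2 : Nat) : Int))))
        ((10 : Int) ^ 9, -1, -1) := by
  rw [pvE0, List.foldl_flatMap]
  apply PySem.List.foldl_congr_mem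
  intro b i hi
  simp only [List.mem_range] at hi
  rw [List.foldl_map]
  by_cases hA : A.getD i (-1) ≠ -1
  · rw [if_pos hA]
    refine (pv_foldl_id _ _ _ ?_).symm
    intro b2 j hj
    simp only [pvSel]
    rw [if_neg]
    rintro ⟨hok, -⟩
    simp only [Bool.and_eq_true, decide_eq_true_eq] at hok
    exact hA hok.1
  · rw [if_neg hA]
    rw [not_not] at hA
    apply PySem.List.foldl_congr_mem
    intro b2 j hj
    simp only [List.mem_range] at hj
    rw [pvCosts_get args params i j hi hj]
    simp only [pvSel, Bool.and_eq_true, Bool.not_eq_eq_eq_not, Bool.not_true, decide_eq_true_eq]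
    by_cases hc : PySem.Set.contains u ((j : Nat) : Int) = true
    · rw [if_pos hc, if_neg]
      rintro ⟨⟨-, hcc⟩, -⟩
      rw [hc] at hcc
      exact Bool.true_eq_false.mp hcc
    · have hc' : PySem.Set.contains u ((j : Nat) : Int) = false := by
        cases h : PySem.Set.contains u ((j : Nat) : Int)
        · rfl
        · exact absurd h hc
      rw [if_neg hc]
      by_cases hlt : pvCost args params i j < b2.1
      · rw [if_pos hlt, if_pos ⟨⟨hA, hc'⟩, hlt⟩]
      · rw [if_neg hlt, if_neg (by rintro ⟨-, h⟩; exact hlt h)]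

lemma pvOK_conv (A : List Int) (U : List Bool) (u : PySem.Set Int) (P : Nat)
    (hrel : ∀ j : Nat, j < P → (((j : Int) ∈ u) ↔ U.getD j true = true))
    (e : Int × Nat × Nat) (he : e.2.2 < P) :
    (decide (A.getD e.2.1 (-1) = -1) && !(PySem.Set.contains u ((e.2.2 : Nat) : Int))) = pvOKb A U e := by
  have hiff := hrel e.2.2 he
  by_cases hm : ((e.2.2 : Nat) : Int) ∈ u
  · have hc : PySem.Set.contains u ((e.2.2 : Nat) : Int) = true := (PySem.Set.contains_iff _ _).mpr hm
    have hg : U.getD e.2.2 true = true := hiff.mp hm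
    simp [pvOKb, hm, hg, -List.getD_eq_getElem?_getD]
  · have hc : PySem.Set.contains u ((e.2.2 : Nat) : Int) = false := by
      cases h : PySem.Set.contains u ((e.2.2 : Nat) : Int)
      · rfl
      · exact absurd ((PySem.Set.contains_iff _ _).mp h) hm
    have hg : U.getD e.2.2 true = false := by
      cases h : U.getD e.2.2 true
      · rfl
      · exact absurd (hiff.mpr h) hm
    simp [pvOKb, hm, hg, -List.getD_eq_getElem?_getD]

-- a broken round is the identity
lemma pvRound_done (args params : List String) (A : List Int) (u : PySem.Set Int) :
    pvRound args params (A, u, true) = (A, u, true) := by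
  simp [pvRound]

lemma pvIter_done (args params : List String) (m : Nat) (A : List Int) (u : PySem.Set Int) :
    (pvRound args params)^[m] (A, u, true) = (A, u, true) := by
  induction m with
  | zero => rfl
  | succ m ih => rw [Function.iterate_succ_apply, pvRound_done, ih]

-- ---- the main induction ----

lemma pvMainInd (args params : List String) :
    ∀ (L2 L1 : List (Int × Nat × Nat)) (n : Nat) (A : List Int) (u : PySem.Set Int) (U : List Bool),
    L1 ++ L2 = pvLsort args params →
    (∀ f ∈ L1, pvOKb A U f = false) →
    A.length = min args.length params.length →
    U.length = params.length →
    (∀ j : Nat, j < params.length → (((j : Int) ∈ u) ↔ U.getD j true = true)) →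
    A.count (-1) = n →
    ((pvRound args params)^[n] (A, u, false)).1 = (L2.foldl pvStepB (A, U)).1 := by
  intro L2
  induction L2 with
  | nil =>
    intro L1 n A u U hsplit hL1 hA hU hrel hcount
    simp only [List.foldl_nil]
    cases n with
    | zero => rfl
    | succ n =>
      have hallF : ∀ g ∈ pvE0F args params,
          (fun e => decide (A.getD e.2.1 (-1) = -1) && !(PySem.Set.contains u ((e.2.2 : Nat) : Int))) g = false := by
        intro g hg
        have hgL : g ∈ pvLsort args params := (pvLsort_perm args params).symm.mem_iff.mp hg
        rw [← hsplit, List.append_nil] at hgL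
        have hj := (pvE0_mem args params g (pvE0F_mem args params g hg).1).2.1
        show (decide (A.getD g.2.1 (-1) = -1) && !(PySem.Set.contains u ((g.2.2 : Nat) : Int))) = false
        rw [pvOK_conv A U u params.length hrel g hj]
        exact hL1 g hgL
      have hnone : pvRound args params (A, u, false) = (A, u, true) := by
        simp only [pvRound]
        have hfe : (pvE0 args params).filter (fun e => decide (e.1 < (10 : Int) ^ 9)) = pvE0F args params := rfl
        rw [pvRound_scan args params A u,
          pvScan_filter _ (pvE0 args params) _ (by norm_num), hfe,
          pvScan_none _ _ _ hallF]
        norm_num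
      rw [Function.iterate_succ_apply, hnone, pvIter_done]
  | cons e L2' ih =>
    intro L1 n A u U hsplit hL1 hA hU hrel hcount
    have hmemLs : e ∈ pvLsort args params := by rw [← hsplit]; simp
    have heF : e ∈ pvE0F args params := (pvLsort_perm args params).mem_iff.mp hmemLs
    obtain ⟨hei, hej, -⟩ := pvE0_mem args params e (pvE0F_mem args params e heF).1
    have heiA : e.2.1 < A.length := by rw [hA]; exact hei
    have hejU : e.2.2 < U.length := by rw [hU]; exact hej
    have hsub : ∀ f ∈ L1, f ∈ pvE0F args params := by
      intro f hf
      apply (pvLsort_perm args params).mem_iff.mp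
      rw [← hsplit]
      exact List.mem_append.mpr (Or.inl hf)
    by_cases hok : A.getD e.2.1 (-1) = -1 ∧ U.getD e.2.2 true = false
    · -- the head edge is taken by both sides
      have hn : n ≠ 0 := by
        have hmem : (-1 : Int) ∈ A := by
          rw [← hok.1, List.getD_eq_getElem _ _ heiA]
          exact List.getElem_mem _
        have := List.count_pos_iff.mpr hmem
        omega
      obtain ⟨n', rfl⟩ : ∃ n', n = n' + 1 := ⟨n - 1, by omega⟩
      have hsel : (pvE0 args params).foldl
          (pvSel (fun g => decide (A.getD g.2.1 (-1) = -1) && !(PySem.Set.contains u ((g.2.2 : Nat) : Int))))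
          ((10 : Int) ^ 9, -1, -1) = (e.1, (e.2.1 : Int), (e.2.2 : Int)) := by
        apply pvSelMain args params _ L1 e L2' hsplit
        · intro f hf
          rw [pvOK_conv A U u params.length hrel f
            (pvE0_mem args params f (pvE0F_mem args params f (hsub f hf)).1).2.1]
          exact hL1 f hf
        · rw [pvOK_conv A U u params.length hrel e hej]
          simp only [pvOKb, decide_eq_true_eq]
          exact hok
      have hround : pvRound args params (A, u, false) =
          (A.set e.2.1 ((e.2.2 : Nat) : Int), PySem.Set.add u ((e.2.2 : Nat) : Int), false) := by
        simp only [pvRound]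
        rw [pvRound_scan args params A u, hsel]
        have hne : ¬ ((e.2.1 : Nat) : Int) = -1 := by omega
        simp [hne, Int.toNat_natCast]
      have hstep : pvStepB (A, U) e = (A.set e.2.1 ((e.2.2 : Nat) : Int), U.set e.2.2 true) := by
        simp only [pvStepB, if_pos hok]
      rw [Function.iterate_succ_apply, hround, List.foldl_cons, hstep]
      apply ih (L1 ++ [e]) n'
      · rw [List.append_assoc]
        simpa using hsplit
      · intro f hf
        rcases List.mem_append.mp hf with hf | hf
        · have hf0 := hL1 f hf
          simp only [pvOKb, decide_eq_false_iff_not] at hf0 ⊢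
          rw [pvGetD_set, pvGetD_set]
          rintro ⟨h1, h2⟩
          apply hf0
          constructor
          · by_cases hc : f.2.1 = e.2.1 ∧ e.2.1 < A.length
            · rw [if_pos hc] at h1; omega
            · rwa [if_neg hc] at h1
          · by_cases hc : f.2.2 = e.2.2 ∧ e.2.2 < U.length
            · rw [if_pos hc] at h2; simp at h2
            · rwa [if_neg hc] at h2
        · rcases List.mem_singleton.mp hf with rfl
          simp only [pvOKb, decide_eq_false_iff_not]
          rw [pvGetD_set, if_pos ⟨rfl, heiA⟩]
          rintro ⟨h1, -⟩
          omega
      · simpa using hA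
      · simpa using hU
      · intro j hj
        rw [PySem.Set.mem_add, pvGetD_set]
        by_cases hje : j = e.2.2
        · subst hje
          simp [hejU]
        · have hne : ¬ ((j : Nat) : Int) = ((e.2.2 : Nat) : Int) := by omega
          simp only [hne, or_false]
          rw [if_neg (by tauto)]
          exact hrel j hj
      · have hcs := pvCount_set A e.2.1 ((e.2.2 : Nat) : Int) heiA hok.1 (by omega)
        omega
    · -- the head edge is skipped by both sides
      rw [List.foldl_cons, show pvStepB (A, U) e = (A, U) from by simp only [pvStepB, if_neg hok]]
      apply ih (L1 ++ [e]) n A u U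
      · rw [List.append_assoc]
        simpa using hsplit
      · intro f hf
        rcases List.mem_append.mp hf with hf | hf
        · exact hL1 f hf
        · rcases List.mem_singleton.mp hf with rfl
          simp only [pvOKb, decide_eq_false_iff_not]
          exact hok
      · exact hA
      · exact hU
      · exact hrel
      · exact hcount

-- ===== VERDICT (by name: the statement is the Claim_ definition above) =====
theorem greedy_optimal_assignment_py_spec : Claim_equal_greedy_optimal_assignment_py := by
  unfold Claim_equal_greedy_optimal_assignment_py
  intro args params hdom
  unfold Spec_greedy_optimal_assignment_py
  have ha : greedy_optimal_assignment_py args params =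
      ((pvRound args params)^[min args.length params.length]
        (List.replicate (min args.length params.length) (-1), PySem.Set.empty, false)).1 := by
    show ((List.range (min args.length params.length)).foldl (fun st _ => pvRound args params st)
      (List.replicate (min args.length params.length) (-1), PySem.Set.empty, false)).1 = _
    rw [pv_foldl_iterate, List.length_range]
  have hb : greedy_optimal_assignment_py_alt args params =
      ((pvLsort args params).foldl pvStepB
        (List.replicate (min args.length params.length) (-1), List.replicate params.length false)).1 := by
    show ((((List.range (min args.length params.length)).flatMap (fun i =>
      ((List.range params.length).map (fun j =>
        (pvED (args.getD i "") (params.getD j ""), i, j))).filter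
        (fun e => decide (e.1 < (10 : Int) ^ 9)))).mergeSort pvLexLe).foldl pvStepB
      (List.replicate (min args.length params.length) (-1), List.replicate params.length false)).1 = _
    rw [pvE0F_eq_alt_edges]
    rfl
  rw [ha, hb]
  exact pvMainInd args params
    (pvLsort args params) [] (min args.length params.length)
    (List.replicate (min args.length params.length) (-1))
    PySem.Set.empty
    (List.replicate params.length false)
    (by simp)
    (by simp)
    (by simp)
    (by simp)
    (by
      intro j hj
      constructor
      · intro h; exact absurd h (List.not_mem_nil)
      · intro h
        rw [List.getD_replicate _ hj] at h
        exact absurd h (by simp))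
    (by simp)
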